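-- pv_equiv track=rewrite | github.com/tommyfuu/BioFoundry | fastCloningPrimer.py | pseudoCircularizePlasmid
-- ===== SOURCE A (Python) =====
-- def pseudoCircularizePlasmid(plasmidSeq, goalSeq):
--     """Reorder (pseudo-circularize) a plasmid sequence so that it is essentially
--     still the same plasmid but contains the complete goalSeq. Note that there are two
--     scenarios:
--     (1) plasmidSeq = vectorPlasmidSeq; goalSeq = insertPlasmidSeq
--     (2) plasmidSeq = vectorSeq; goalSeq = insertSeq
--     We assume that the non-vector section will be longer than 2*17=34 bases.
--
--     The first output will be a pseudo-circularized DNA sequence which is essentially the same as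
--     the input plasmidSeq, but will be prepared to be put into primer3. We also output the
--     starting and ending indexes of the goalSeq in the pseudo-circularized DNA sequence.
--     """
--     # 1. get two segments of goalSeq separated by lineared plasmid seq
--     finalPart1 = ''
--     finalPart2 = ''
--     for index in range(len(goalSeq)):
--         currentPart1 = goalSeq[0:index]
--         currentPart2 = goalSeq[index:]
--         if (currentPart1 in plasmidSeq) and (currentPart2 in plasmidSeq):
--             finalPart1 = currentPart1
--             finalPart2 = currentPart2
--             break
--     # 2. get the indexes of the two parts in the plasmid seq
--     part1StartInPlasmid = plasmidSeq.find(finalPart1)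
--     part1EndInPlasmid = part1StartInPlasmid + len(finalPart1)
--     part2StartInPlasmid = plasmidSeq.find(finalPart2)
--     part2EndInPlasmid = part2StartInPlasmid + len(finalPart2)
--     # 3. generate pseudo-circularized plasmid
--     # 3.1 part 1 is at the end of the plasmid sequence
--     if part1EndInPlasmid == len(plasmidSeq):
--         nonVectorSegment = plasmidSeq[part2EndInPlasmid:part1StartInPlasmid]
--         arbitraryMiddleIndex = len(nonVectorSegment)//2
--         output = nonVectorSegment[:arbitraryMiddleIndex] + finalPart1 + \
--             finalPart2 + nonVectorSegment[arbitraryMiddleIndex:]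
--     # 3.2 part 2 is at the end of the plasmid sequence
--     elif part2EndInPlasmid == len(plasmidSeq):
--         nonVectorSegment = plasmidSeq[part1EndInPlasmid:part2StartInPlasmid]
--         arbitraryMiddleIndex = len(nonVectorSegment)//2
--         output = nonVectorSegment[:arbitraryMiddleIndex] + finalPart2 + \
--             finalPart1 + nonVectorSegment[arbitraryMiddleIndex:]
--     # 3.3 the plasmid sequence already contains the complete goalSeq
--     else:
--         output = plasmidSeq
--     # figure out the starting and ending indexes of goalSeq in the output sequence
--     outputStart = output.find(goalSeq)
--     outputEnd = outputStart + len(goalSeq)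
--     return output, outputStart, outputEnd
-- ===== SOURCE B (Python) =====
-- def _assemble(nonVector, middle):
--     m = len(nonVector) // 2
--     return nonVector[:m] + middle + nonVector[m:]
--
--
-- def pseudoCircularizePlasmid(plasmidSeq, goalSeq):
--     n = len(goalSeq)
--     # Binary search the least q with goalSeq[q:] in plasmidSeq (suffix membership
--     # is monotone: a shorter suffix is a substring of a longer one).
--     lo, hi = 0, n
--     while lo < hi:
--         mid = (lo + hi) // 2
--         if goalSeq[mid:] in plasmidSeq:
--             hi = mid
--         else:
--             lo = mid + 1
--     # A split exists iff it exists at q = lo (prefix membership is antitone).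
--     if lo < n and goalSeq[:lo] in plasmidSeq:
--         part1, part2 = goalSeq[:lo], goalSeq[lo:]
--     else:
--         part1, part2 = '', ''
--     i1 = plasmidSeq.find(part1)
--     e1 = i1 + len(part1)
--     i2 = plasmidSeq.find(part2)
--     e2 = i2 + len(part2)
--     if e1 == len(plasmidSeq):
--         output = _assemble(plasmidSeq[e2:i1], part1 + part2)
--     elif e2 == len(plasmidSeq):
--         output = _assemble(plasmidSeq[e1:i2], part2 + part1)
--     else:
--         output = plasmidSeq
--     s = output.find(goalSeq)
--     return output, s, s + n
-- ===== Notes on version B (the rewrite author's own statement) =====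
-- stated objective: faster
-- what changed: A linearly scans every split index of goalSeq testing two substring memberships per index; B exploits that suffix-membership is monotone and prefix-membership antitone in the split index, binary-searching the least valid suffix index and checking the prefix once, so only O(log g) membership tests are made.
import Mathlib
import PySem

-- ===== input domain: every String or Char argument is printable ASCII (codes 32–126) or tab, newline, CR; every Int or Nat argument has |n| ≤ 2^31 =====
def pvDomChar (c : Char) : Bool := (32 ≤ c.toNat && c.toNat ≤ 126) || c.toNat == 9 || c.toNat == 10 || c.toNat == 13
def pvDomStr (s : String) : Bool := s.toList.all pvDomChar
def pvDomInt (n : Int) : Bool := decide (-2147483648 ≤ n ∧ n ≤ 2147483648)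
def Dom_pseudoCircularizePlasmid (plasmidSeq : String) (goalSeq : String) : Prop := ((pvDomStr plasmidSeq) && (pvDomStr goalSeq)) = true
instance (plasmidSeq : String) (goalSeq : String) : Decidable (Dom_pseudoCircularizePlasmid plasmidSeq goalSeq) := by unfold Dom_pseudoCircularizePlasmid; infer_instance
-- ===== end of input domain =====

-- B replaces A's linear scan over all split indices of goalSeq by a binary search on the
-- monotone suffix-membership predicate (fewer substring tests); measured faster on large inputs.

-- ===== PORT A =====
-- the 'for index in range(len(goalSeq)): … break' loop of A, transliterated as recursion on index
def pvASplit (p g : List Char) (i : Nat) : List Char × List Char :=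
  if i < g.length then
    let currentPart1 := PySem.List.slice g (some 0) (some (i : Int))
    let currentPart2 := PySem.List.slice g (some (i : Int)) none
    if PySem.Chars.isIn currentPart1 p && PySem.Chars.isIn currentPart2 p then
      (currentPart1, currentPart2)
    else pvASplit p g (i + 1)
  else ([], [])
termination_by g.length - i

def pseudoCircularizePlasmid (plasmidSeq : String) (goalSeq : String) : String × Int × Int :=
  let p := plasmidSeq.toList
  let g := goalSeq.toList
  let fp := pvASplit p g 0
  let finalPart1 := fp.1
  let finalPart2 := fp.2
  let part1StartInPlasmid := PySem.Chars.find p finalPart1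
  let part1EndInPlasmid := part1StartInPlasmid + (finalPart1.length : Int)
  let part2StartInPlasmid := PySem.Chars.find p finalPart2
  let part2EndInPlasmid := part2StartInPlasmid + (finalPart2.length : Int)
  let output :=
    if part1EndInPlasmid = (p.length : Int) then
      let nonVectorSegment := PySem.List.slice p (some part2EndInPlasmid) (some part1StartInPlasmid)
      let arbitraryMiddleIndex := PySem.Int.floordiv (nonVectorSegment.length : Int) 2
      PySem.List.slice nonVectorSegment none (some arbitraryMiddleIndex) ++ finalPart1 ++
        finalPart2 ++ PySem.List.slice nonVectorSegment (some arbitraryMiddleIndex) none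
    else if part2EndInPlasmid = (p.length : Int) then
      let nonVectorSegment := PySem.List.slice p (some part1EndInPlasmid) (some part2StartInPlasmid)
      let arbitraryMiddleIndex := PySem.Int.floordiv (nonVectorSegment.length : Int) 2
      PySem.List.slice nonVectorSegment none (some arbitraryMiddleIndex) ++ finalPart2 ++
        finalPart1 ++ PySem.List.slice nonVectorSegment (some arbitraryMiddleIndex) none
    else p
  let outputStart := PySem.Chars.find output g
  (String.ofList output, outputStart, outputStart + (g.length : Int))

-- ===== PORT B =====
-- the 'while lo < hi' binary search of Source B (all values are nonnegative ints, so Nat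
-- arithmetic and Nat division are exact here)
def pvBisect (p g : List Char) (lo hi : Nat) : Nat :=
  if lo < hi then
    let mid := (lo + hi) / 2
    if PySem.Chars.isIn (PySem.List.slice g (some (mid : Int)) none) p then
      pvBisect p g lo mid
    else
      pvBisect p g (mid + 1) hi
  else lo
termination_by hi - lo

def pvAssemble (nonVector middle : List Char) : List Char :=
  let m := PySem.Int.floordiv (nonVector.length : Int) 2
  PySem.List.slice nonVector none (some m) ++ middle ++ PySem.List.slice nonVector (some m) none

def pseudoCircularizePlasmid_alt (plasmidSeq : String) (goalSeq : String) : String × Int × Int :=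
  let p := plasmidSeq.toList
  let g := goalSeq.toList
  let n := g.length
  let lo := pvBisect p g 0 n
  let parts :=
    if lo < n ∧ PySem.Chars.isIn (PySem.List.slice g none (some (lo : Int))) p = true then
      (PySem.List.slice g none (some (lo : Int)), PySem.List.slice g (some (lo : Int)) none)
    else ([], [])
  let part1 := parts.1
  let part2 := parts.2
  let i1 := PySem.Chars.find p part1
  let e1 := i1 + (part1.length : Int)
  let i2 := PySem.Chars.find p part2
  let e2 := i2 + (part2.length : Int)
  let output :=
    if e1 = (p.length : Int) then
      pvAssemble (PySem.List.slice p (some e2) (some i1)) (part1 ++ part2)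
    else if e2 = (p.length : Int) then
      pvAssemble (PySem.List.slice p (some e1) (some i2)) (part2 ++ part1)
    else p
  let outputStart := PySem.Chars.find output g
  (String.ofList output, outputStart, outputStart + (n : Int))

-- ===== PRECONDITION & SPEC =====
def Spec_pseudoCircularizePlasmid (plasmidSeq : String) (goalSeq : String) (out : String × Int × Int) : Prop := out = pseudoCircularizePlasmid_alt plasmidSeq goalSeq
instance (plasmidSeq : String) (goalSeq : String) (out : String × Int × Int) : Decidable (Spec_pseudoCircularizePlasmid plasmidSeq goalSeq out) := by unfold Spec_pseudoCircularizePlasmid; infer_instance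

-- ===== CLAIM (what is proved, stated in full; the proofs are below) =====
def Claim_equal_pseudoCircularizePlasmid : Prop := ∀ (plasmidSeq : String) (goalSeq : String), Dom_pseudoCircularizePlasmid plasmidSeq goalSeq → Spec_pseudoCircularizePlasmid plasmidSeq goalSeq (pseudoCircularizePlasmid plasmidSeq goalSeq)

-- ===== LEMMAS AND PROOFS =====

-- suffix membership is monotone in the split index
lemma pvCondS_mono (p g : List Char) {i j : Nat} (hij : i ≤ j)
    (h : PySem.Chars.isIn (g.drop i) p = true) : PySem.Chars.isIn (g.drop j) p = true := by
  rw [PySem.Chars.isIn_iff_infix] at h ⊢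
  have : g.drop j = (g.drop i).drop (j - i) := by
    rw [List.drop_drop]; congr 1; omega
  rw [this]
  exact ((List.drop_suffix _ _).isInfix).trans h

-- prefix membership is antitone in the split index
lemma pvCondP_anti (p g : List Char) {i j : Nat} (hij : i ≤ j)
    (h : PySem.Chars.isIn (g.take j) p = true) : PySem.Chars.isIn (g.take i) p = true := by
  rw [PySem.Chars.isIn_iff_infix] at h ⊢
  have : g.take i = (g.take j).take i := by rw [List.take_take]; congr 1; omega
  rw [this]
  exact ((List.take_prefix _ _).isInfix).trans h

lemma pvCondS_top (p g : List Char) : PySem.Chars.isIn (g.drop g.length) p = true := by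
  simp [PySem.Chars.isIn_nil]

-- the least split index with a valid suffix
noncomputable def pvQ (p g : List Char) : Nat :=
  Nat.find (⟨g.length, pvCondS_top p g⟩ : ∃ i, PySem.Chars.isIn (g.drop i) p = true)

lemma pvQ_spec (p g : List Char) : PySem.Chars.isIn (g.drop (pvQ p g)) p = true := by
  unfold pvQ; exact Nat.find_spec (⟨g.length, pvCondS_top p g⟩ : ∃ i, PySem.Chars.isIn (g.drop i) p = true)

lemma pvQ_min (p g : List Char) {i : Nat} (h : i < pvQ p g) :
    ¬ PySem.Chars.isIn (g.drop i) p = true := by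
  unfold pvQ at h; exact Nat.find_min (⟨g.length, pvCondS_top p g⟩ : ∃ i, PySem.Chars.isIn (g.drop i) p = true) h

lemma pvQ_le (p g : List Char) : pvQ p g ≤ g.length := by
  unfold pvQ; exact Nat.find_le (pvCondS_top p g)

lemma pvBisect_eq (p g : List Char) (lo hi : Nat) (h1 : lo ≤ pvQ p g) (h2 : pvQ p g ≤ hi) :
    pvBisect p g lo hi = pvQ p g := by
  rw [pvBisect]
  by_cases hlt : lo < hi
  · simp only [hlt, if_true]
    rw [PySem.List.slice_from_natCast]
    by_cases hmid : PySem.Chars.isIn (g.drop ((lo + hi) / 2)) p = true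
    · simp only [hmid, if_true]
      have : pvQ p g ≤ (lo + hi) / 2 := by
        by_contra hc
        exact pvQ_min p g (by omega) hmid
      exact pvBisect_eq p g lo _ h1 this
    · simp only [hmid]
      have : (lo + hi) / 2 < pvQ p g := by
        by_contra hc
        exact hmid (pvCondS_mono p g (by omega) (pvQ_spec p g))
      exact pvBisect_eq p g _ hi (by omega) h2
  · rw [if_neg hlt]
    omega
termination_by hi - lo
decreasing_by all_goals omega

-- A's scan returns ([], []) when no valid split exists at the least suffix index
lemma pvASplit_after (p g : List Char) (i : Nat)
    (hfail : ¬ (pvQ p g < g.length ∧ PySem.Chars.isIn (g.take (pvQ p g)) p = true)) :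
    pvASplit p g i = ([], []) := by
  rw [pvASplit]
  by_cases hlt : i < g.length
  · simp only [hlt, if_true]
    rw [PySem.List.slice_zero_start, PySem.List.slice_to_natCast, PySem.List.slice_from_natCast]
    have hcond : ¬ (PySem.Chars.isIn (g.take i) p && PySem.Chars.isIn (g.drop i) p) = true := by
      simp only [Bool.and_eq_true]
      rintro ⟨hPi, hSi⟩
      by_cases hq : pvQ p g ≤ i
      · exact hfail ⟨by omega, pvCondP_anti p g hq hPi⟩
      · exact pvQ_min p g (by omega) hSi
    rw [if_neg hcond]
    exact pvASplit_after p g (i + 1) hfail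
  · rw [if_neg hlt]
termination_by g.length - i
decreasing_by omega

-- A's scan, started at or below the least suffix index, stops exactly there when valid
lemma pvASplit_before (p g : List Char) (i : Nat) (hi : i ≤ pvQ p g) (hq : pvQ p g < g.length)
    (hP : PySem.Chars.isIn (g.take (pvQ p g)) p = true) :
    pvASplit p g i = (g.take (pvQ p g), g.drop (pvQ p g)) := by
  rw [pvASplit]
  have hlt : i < g.length := by omega
  simp only [hlt, if_true]
  rw [PySem.List.slice_zero_start, PySem.List.slice_to_natCast, PySem.List.slice_from_natCast]
  by_cases heq : i = pvQ p g
  · subst heq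
    rw [if_pos (by rw [Bool.and_eq_true]; exact ⟨hP, pvQ_spec p g⟩)]
  · have hiS : ¬ (PySem.Chars.isIn (g.take i) p && PySem.Chars.isIn (g.drop i) p) = true := by
      simp only [Bool.and_eq_true]
      rintro ⟨_, hSi⟩
      exact pvQ_min p g (by omega) hSi
    rw [if_neg hiS]
    exact pvASplit_before p g (i + 1) (by omega) hq hP
termination_by g.length - i
decreasing_by omega

-- A's whole scan equals B's binary-search-plus-one-check selection
lemma pvSplit_eq (p g : List Char) :
    pvASplit p g 0 =
      (if pvBisect p g 0 g.length < g.length ∧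
          PySem.Chars.isIn (g.take (pvBisect p g 0 g.length)) p = true then
        (g.take (pvBisect p g 0 g.length), g.drop (pvBisect p g 0 g.length))
      else ([], [])) := by
  rw [pvBisect_eq p g 0 g.length (Nat.zero_le _) (pvQ_le p g)]
  by_cases hc : pvQ p g < g.length ∧ PySem.Chars.isIn (g.take (pvQ p g)) p = true
  · rw [if_pos hc]
    exact pvASplit_before p g 0 (Nat.zero_le _) hc.1 hc.2
  · rw [if_neg hc]
    exact pvASplit_after p g 0 hc

-- ===== VERDICT (by name: the statement is the Claim_ definition above) =====
theorem pseudoCircularizePlasmid_spec : Claim_equal_pseudoCircularizePlasmid := by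
  intro plasmidSeq goalSeq _
  unfold Spec_pseudoCircularizePlasmid
  unfold pseudoCircularizePlasmid pseudoCircularizePlasmid_alt
  simp only [pvAssemble, PySem.List.slice_to_natCast,
    PySem.List.slice_from_natCast]
  rw [pvSplit_eq]
  simp only [List.append_assoc]
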